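-- pv_equiv track=rewrite | github.com/crAyCoding/runeterraBot | src/TwentyGame.py | get_waiting_list
-- ===== SOURCE A (Python) =====
-- def get_waiting_list(user_info: list, game_members: int):
--     # 대기자 명단 반환
--
--     line_names = ['탑', '정글', '미드', '원딜', '서폿']
--
--     waiting_list = ''
--
--     for line_number in range(len(user_info)):
--         for i in range(len(user_info[line_number])):
--             if i == (game_members // 5):
--                 waiting_list += f'{line_names[line_number]}\n'
--
--             if i >= (game_members // 5):
--                 waiting_list += f'{user_info[line_number][i]}\n'
--
--     if waiting_list == '':
--         return waiting_list
--
--     result = ''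
--     result += f'대기 명단\n'
--     result += f'=========================================\n'
--     result += waiting_list
--     result += f'========================================='
--
--     return result
-- ===== SOURCE B (Python) =====
-- def get_waiting_list(user_info: list, game_members: int):
--     # 대기자 명단 반환 — recursive back-to-front build of the list of output lines,
--     # pairing rows with their position names via zip, joined once at the end.
--
--     threshold = game_members // 5
--
--     def blocks(pairs):
--         # lines contributed by 'pairs', built tail-first (back to front)
--         if not pairs:
--             return []
--         name, row = pairs[0]
--         rest = blocks(pairs[1:])
--         tail = row[threshold:]
--         return ([name] + tail + rest) if tail else rest
--
--     lines = blocks(list(zip(['탑', '정글', '미드', '원딜', '서폿'], user_info)))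
--     if not lines:
--         return ''
--
--     bar = '========================================='
--     return '대기 명단\n' + bar + '\n' + '\n'.join(lines) + '\n' + bar
-- ===== Notes on version B (the rewrite author's own statement) =====
-- stated objective: alternative
-- what changed: Replaces A's nested index loop with per-index i==threshold / i>=threshold comparisons and incremental string += by a recursive back-to-front pass: rows are zipped with their position names, a recursion builds the list of output lines tail-first (header line plus the row's tail past threshold when non-empty), and the body is produced by a single '\n'.join at the end instead of appending '\n' piecewise. Pre_ excludes negative game_members (a member count, outside the natural domain; …
import Mathlib
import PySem

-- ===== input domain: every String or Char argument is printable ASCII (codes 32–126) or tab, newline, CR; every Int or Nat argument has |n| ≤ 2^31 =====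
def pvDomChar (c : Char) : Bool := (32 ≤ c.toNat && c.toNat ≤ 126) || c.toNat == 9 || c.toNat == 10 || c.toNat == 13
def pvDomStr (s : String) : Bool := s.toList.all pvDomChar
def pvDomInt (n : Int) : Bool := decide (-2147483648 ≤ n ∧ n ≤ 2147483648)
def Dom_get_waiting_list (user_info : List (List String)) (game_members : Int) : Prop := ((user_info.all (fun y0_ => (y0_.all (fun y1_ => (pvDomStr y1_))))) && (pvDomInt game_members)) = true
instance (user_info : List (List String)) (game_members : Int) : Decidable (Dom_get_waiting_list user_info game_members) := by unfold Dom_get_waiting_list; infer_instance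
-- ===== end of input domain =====

-- B builds the output lines by a recursive back-to-front pass over the rows zipped with
-- their position names, joining them once with '\n' at the end (objective: alternative).

-- ===== PORT A =====
def get_waiting_list (user_info : List (List String)) (game_members : Int) : String :=
  let line_names : List String := ["탑", "정글", "미드", "원딜", "서폿"]
  let waiting_list :=
    (PySem.List.pyRange 0 (user_info.length : Int) 1).foldl (fun wl line_number =>
      let row := PySem.List.pyGetD user_info line_number []
      (PySem.List.pyRange 0 (row.length : Int) 1).foldl (fun wl i =>
        let wl := if i == PySem.Int.floordiv game_members 5
                  then wl ++ PySem.List.pyGetD line_names line_number "" ++ "\n" else wl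
        if PySem.Int.floordiv game_members 5 ≤ i
        then wl ++ PySem.List.pyGetD row i "" ++ "\n" else wl) wl) ""
  if waiting_list == "" then waiting_list
  else "대기 명단\n" ++ "=========================================\n" ++ waiting_list
        ++ "========================================="

-- ===== PORT B =====
-- the recursive helper 'blocks' of Source B: lines contributed by the pairs, built tail-first
def pvBlocks (t : Int) : List (String × List String) → List String
  | [] => []
  | (name, row) :: ps =>
      let rest := pvBlocks t ps
      let tail := PySem.List.slice row (some t) none
      if tail.isEmpty then rest else name :: (tail ++ rest)

def get_waiting_list_alt (user_info : List (List String)) (game_members : Int) : String :=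
  let threshold := PySem.Int.floordiv game_members 5
  let lines := pvBlocks threshold (List.zip ["탑", "정글", "미드", "원딜", "서폿"] user_info)
  if lines.isEmpty then ""
  else
    let bar := "========================================="
    "대기 명단\n" ++ bar ++ "\n" ++ PySem.Str.join "\n" lines ++ "\n" ++ bar

-- ===== PRECONDITION & SPEC =====
-- Pre_ excludes negative game_members (a member count, outside the natural domain; A there dumps
-- every name with no headers, an artefact of its index comparisons) and the inputs with a sixth or
-- later line still holding waiting names, on which A raises IndexError on line_names.
def Pre_get_waiting_list (user_info : List (List String)) (game_members : Int) : Prop :=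
  0 ≤ game_members ∧
    ∀ row ∈ user_info.drop 5, (row.length : Int) ≤ PySem.Int.floordiv game_members 5
instance (user_info : List (List String)) (game_members : Int) : Decidable (Pre_get_waiting_list user_info game_members) := by unfold Pre_get_waiting_list; infer_instance
def pvWitness_get_waiting_list : List (List String) × Int := ([["alice", "bob"], [], ["carol"]], 5)
def Spec_get_waiting_list (user_info : List (List String)) (game_members : Int) (out : String) : Prop := out = get_waiting_list_alt user_info game_members
instance (user_info : List (List String)) (game_members : Int) (out : String) : Decidable (Spec_get_waiting_list user_info game_members out) := by unfold Spec_get_waiting_list; infer_instance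

-- ===== CLAIM (what is proved, stated in full; the proofs are below) =====
def Claim_equal_get_waiting_list : Prop := ∀ (user_info : List (List String)) (game_members : Int), Dom_get_waiting_list user_info game_members → Pre_get_waiting_list user_info game_members → Spec_get_waiting_list user_info game_members (get_waiting_list user_info game_members)

-- ===== LEMMAS AND PROOFS =====

-- ''.join of a cons / of an append / of nil
lemma joinE_cons (p : String) (ps : List String) :
    PySem.Str.join "" (p :: ps) = p ++ PySem.Str.join "" ps := by
  apply String.toList_inj.mp
  cases ps with
  | nil => simp [PySem.Str.toList_join, PySem.Chars.join, List.intercalate]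
  | cons q rest => simp [PySem.Str.toList_join, PySem.Chars.join_cons_cons]

lemma joinE_append (a b : List String) :
    PySem.Str.join "" (a ++ b) = PySem.Str.join "" a ++ PySem.Str.join "" b := by
  induction a with
  | nil =>
      have : PySem.Str.join "" ([] : List String) = "" := by
        apply String.toList_inj.mp; simp [PySem.Str.toList_join, PySem.Chars.join_nil]
      simp [this, String.empty_append]
  | cons p t ih => simp [joinE_cons, ih, String.append_assoc]

lemma joinE_nil : PySem.Str.join "" ([] : List String) = "" := by
  apply String.toList_inj.mp; simp [PySem.Str.toList_join, PySem.Chars.join_nil]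

-- '\n'.join on a singleton and on two-or-more elements
lemma joinNL_singleton (x : String) : PySem.Str.join "\n" [x] = x := by
  apply String.toList_inj.mp; simp [PySem.Str.toList_join, PySem.Chars.join, List.intercalate]

lemma joinNL_cons₂ (x y : String) (rest : List String) :
    PySem.Str.join "\n" (x :: y :: rest) = x ++ "\n" ++ PySem.Str.join "\n" (y :: rest) := by
  apply String.toList_inj.mp; simp [PySem.Str.toList_join, PySem.Chars.join_cons_cons]

-- ''.join of newline-terminated lines = '\n'.join of the lines plus a final '\n'
lemma joinE_map_nl (l : List String) (h : l ≠ []) :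
    PySem.Str.join "" (l.map (fun s => s ++ "\n")) = PySem.Str.join "\n" l ++ "\n" := by
  induction l with
  | nil => exact absurd rfl h
  | cons x rest ih =>
      cases rest with
      | nil => simp [joinE_cons, joinE_nil, joinNL_singleton, String.append_empty]
      | cons y r =>
          rw [List.map_cons, joinE_cons, ih (by simp), joinNL_cons₂]
          simp [String.append_assoc]

-- the string pieces A emits for one line
def rowParts (name : String) (row : List String) (t : Int) : List String :=
  if (List.drop t.toNat row).isEmpty then []
  else (name ++ "\n") :: (List.drop t.toNat row).map (fun s => s ++ "\n")

-- a fold appending strings is the join of the pieces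
lemma foldl_append_join (l : List String) (acc : String) :
    l.foldl (fun a x => a ++ x ++ "\n") acc
      = acc ++ PySem.Str.join "" (l.map (fun s => s ++ "\n")) := by
  induction l generalizing acc with
  | nil => simp [joinE_nil, String.append_empty]
  | cons x t ih =>
      rw [List.foldl_cons, ih]
      simp [joinE_cons, String.append_assoc]

-- A's inner loop over one line appends exactly the join of that line's pieces
lemma rowA (name : String) (row : List String) (t : Int) (ht : 0 ≤ t) (wl : String) :
    (PySem.List.pyRange 0 (row.length : Int) 1).foldl (fun wl i =>
        let wl := if i == t then wl ++ name ++ "\n" else wl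
        if t ≤ i then wl ++ PySem.List.pyGetD row i "" ++ "\n" else wl) wl
      = wl ++ PySem.Str.join "" (rowParts name row t) := by
  by_cases hlt : t < (row.length : Int)
  · have h0t : (0 : Int) ≤ t := ht
    rw [PySem.List.pyRange_one_append 0 t (row.length : Int) h0t (le_of_lt hlt)]
    rw [List.foldl_append]
    have hpre : (PySem.List.pyRange 0 t 1).foldl (fun wl i =>
        let wl := if i == t then wl ++ name ++ "\n" else wl
        if t ≤ i then wl ++ PySem.List.pyGetD row i "" ++ "\n" else wl) wl = wl := by
      rw [PySem.List.foldl_congr_mem (g := fun wl _ => wl)]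
      · exact PySem.List.foldl_ignore _ _
      · intro acc x hx
        rcases (PySem.List.mem_pyRange_one).1 hx with ⟨_, hxt⟩
        have h1 : ¬ ((x == t) = true) := by simp only [beq_iff_eq]; omega
        have h2 : ¬ (t ≤ x) := by omega
        rw [if_neg h1, if_neg h2]
    rw [hpre]
    rw [PySem.List.pyRange_one_cons hlt, List.foldl_cons]
    have htn : t.toNat < row.length := by omega
    have hget : PySem.List.pyGetD row t "" = row[t.toNat] := by
      rw [PySem.List.pyGetD_of_nonneg row "" ht, List.getD_eq_getElem _ _ htn]
    have hrest : ∀ init : String, (PySem.List.pyRange (t + 1) (row.length : Int) 1).foldl (fun wl i =>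
        let wl := if i == t then wl ++ name ++ "\n" else wl
        if t ≤ i then wl ++ PySem.List.pyGetD row i "" ++ "\n" else wl) init
        = init ++ PySem.Str.join "" ((List.drop (t.toNat + 1) row).map (fun s => s ++ "\n")) := by
      intro init
      rw [PySem.List.foldl_congr_mem
            (g := fun wl i => wl ++ PySem.List.pyGetD row i "" ++ "\n")]
      · rw [PySem.List.foldl_pyRange_pyGetD' row ""
              (fun (a s : String) => a ++ s ++ "\n") _ (by omega : (0:Int) ≤ t + 1)]
        have h1 : (t + 1).toNat = t.toNat + 1 := by omega
        rw [h1, foldl_append_join]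
      · intro acc x hx
        rcases (PySem.List.mem_pyRange_one).1 hx with ⟨hx1, _⟩
        have h1 : ¬ ((x == t) = true) := by simp only [beq_iff_eq]; omega
        have h2 : t ≤ x := by omega
        rw [if_neg h1, if_pos h2]
    rw [hrest]
    have hdrop : List.drop t.toNat row = row[t.toNat] :: List.drop (t.toNat + 1) row :=
      List.drop_eq_getElem_cons htn
    have hne : ¬ (List.drop t.toNat row).isEmpty := by
      rw [hdrop, List.isEmpty_cons]; simp
    rw [rowParts, if_neg hne, hdrop]
    simp only [List.map_cons, joinE_cons]
    simp [hget, String.append_assoc]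
  · have hlen : row.length ≤ t.toNat := by omega
    have hpre : (PySem.List.pyRange 0 (row.length : Int) 1).foldl (fun wl i =>
        let wl := if i == t then wl ++ name ++ "\n" else wl
        if t ≤ i then wl ++ PySem.List.pyGetD row i "" ++ "\n" else wl) wl = wl := by
      rw [PySem.List.foldl_congr_mem (g := fun wl _ => wl)]
      · exact PySem.List.foldl_ignore _ _
      · intro acc x hx
        have hm := (PySem.List.mem_pyRange_one).1 hx
        have hx0 : (0:Int) ≤ x := hm.1
        have hxl : x < (row.length : Int) := hm.2
        have h1 : ¬ ((x == t) = true) := by simp only [beq_iff_eq]; omega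
        have h2 : ¬ (t ≤ x) := by omega
        rw [if_neg h1, if_neg h2]
    rw [hpre]
    have : (List.drop t.toNat row).isEmpty := by
      simp [List.drop_eq_nil_of_le hlen]
    rw [rowParts, if_pos this, joinE_nil, String.append_empty]

-- A's outer loop produces the join of all the pieces
lemma A_fold (names : List String) (t : Int) (ht : 0 ≤ t)
    (l : List (Int × List String)) (wl : String) :
    l.foldl (fun wl p =>
        (PySem.List.pyRange 0 (p.2.length : Int) 1).foldl (fun wl i =>
          let wl := if i == t then wl ++ PySem.List.pyGetD names p.1 "" ++ "\n" else wl
          if t ≤ i then wl ++ PySem.List.pyGetD p.2 i "" ++ "\n" else wl) wl) wl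
      = wl ++ PySem.Str.join ""
          (l.flatMap (fun p => rowParts (PySem.List.pyGetD names p.1 "") p.2 t)) := by
  induction l generalizing wl with
  | nil => simp [joinE_nil, String.append_empty]
  | cons p rest ih =>
      rw [List.foldl_cons, rowA _ _ _ ht, ih]
      simp [List.flatMap_cons, joinE_append, String.append_assoc]

-- pyGetD on a cons at a shifted nonnegative index
lemma pyGetD_cons_succ (x : String) (xs : List String) (i : Int) (hi : 0 ≤ i) :
    PySem.List.pyGetD (x :: xs) (i + 1) "" = PySem.List.pyGetD xs i "" := by
  rw [PySem.List.pyGetD_of_nonneg _ "" (by omega : (0:Int) ≤ i + 1),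
      PySem.List.pyGetD_of_nonneg _ "" hi]
  have h1 : (i + 1).toNat = i.toNat + 1 := by omega
  rw [h1]
  simp [List.getD]

-- shifting the enumerate start by one steps past the head of the name list
lemma enum_shift (G : String → List String → List String) (nm : String) (ns : List String)
    (rs : List (List String)) (s : Int) (hs : 0 ≤ s) :
    (PySem.List.enumerate rs (s + 1)).flatMap
        (fun p => G (PySem.List.pyGetD (nm :: ns) p.1 "") p.2)
      = (PySem.List.enumerate rs s).flatMap (fun p => G (PySem.List.pyGetD ns p.1 "") p.2) := by
  induction rs generalizing s with
  | nil => simp [PySem.List.enumerate_nil]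
  | cons r rest ih =>
      rw [PySem.List.enumerate_cons, PySem.List.enumerate_cons,
          List.flatMap_cons, List.flatMap_cons, pyGetD_cons_succ _ _ _ hs,
          ih (s + 1) (by omega)]

-- under Pre_, A's pieces are exactly B's lines, each newline-terminated
lemma flat_eq (names : List String) (rows : List (List String)) (t : Int) (ht : 0 ≤ t)
    (h : ∀ row ∈ rows.drop names.length, List.drop t.toNat row = []) :
    (PySem.List.enumerate rows 0).flatMap
        (fun p => rowParts (PySem.List.pyGetD names p.1 "") p.2 t)
      = (pvBlocks t (names.zip rows)).map (fun s => s ++ "\n") := by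
  induction names generalizing rows with
  | nil =>
      simp only [List.zip_nil_left, pvBlocks, List.map_nil]
      rw [List.flatMap_eq_nil_iff]
      intro p hp
      have hmem : p.2 ∈ rows := by
        have := PySem.List.map_snd_enumerate rows (0 : Int)
        exact this ▸ List.mem_map_of_mem hp
      have hd : List.drop t.toNat p.2 = [] := h p.2 (by simpa using hmem)
      simp [rowParts, hd]
  | cons nm ns ih =>
      cases rows with
      | nil => simp [PySem.List.enumerate_nil, pvBlocks]
      | cons r rs =>
          rw [PySem.List.enumerate_cons, List.flatMap_cons]
          have hstep : (PySem.List.enumerate rs ((0:Int) + 1)).flatMap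
              (fun p => rowParts (PySem.List.pyGetD (nm :: ns) p.1 "") p.2 t)
              = (pvBlocks t (ns.zip rs)).map (fun s => s ++ "\n") := by
            rw [enum_shift (fun nm row => rowParts nm row t) nm ns rs 0 le_rfl]
            exact ih rs (by simpa using h)
          rw [hstep]
          show rowParts (PySem.List.pyGetD (nm :: ns) 0 "") r t ++ _
                = (pvBlocks t ((nm, r) :: ns.zip rs)).map _
          rw [PySem.List.pyGetD_zero_cons]
          rw [pvBlocks]
          by_cases hd : (PySem.List.slice r (some t) none).isEmpty
          · have hd' : (List.drop t.toNat r).isEmpty := by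
              rwa [PySem.List.slice_from r ht] at hd
            simp only [hd, if_pos, rowParts, hd', List.nil_append]
          · have hd' : ¬ (List.drop t.toNat r).isEmpty := by
              rwa [PySem.List.slice_from r ht] at hd
            rw [if_neg hd, rowParts, if_neg hd', PySem.List.slice_from r ht]
            simp [List.map_append]

-- ===== VERDICT (by name: the statement is the Claim_ definition above) =====
theorem get_waiting_list_spec : Claim_equal_get_waiting_list := by
  intro user_info game_members _hdom hpre
  obtain ⟨hgm, hrows⟩ := hpre
  have ht : 0 ≤ PySem.Int.floordiv game_members 5 := by
    have h1 := PySem.Int.mod_nonneg game_members (b := 5) (by omega)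
    have h2 := PySem.Int.mod_lt game_members (b := 5) (by omega)
    have h3 := PySem.Int.floordiv_mul_add_mod game_members 5
    omega
  set t := PySem.Int.floordiv game_members 5 with hts
  show (let waiting_list := (PySem.List.pyRange 0 (user_info.length : Int) 1).foldl
          (fun wl line_number =>
            let row := PySem.List.pyGetD user_info line_number []
            (PySem.List.pyRange 0 (row.length : Int) 1).foldl (fun wl i =>
              let wl := if i == t
                        then wl ++ PySem.List.pyGetD ["탑", "정글", "미드", "원딜", "서폿"] line_number "" ++ "\n" else wl
              if t ≤ i
              then wl ++ PySem.List.pyGetD row i "" ++ "\n" else wl) wl) ""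
        if waiting_list == "" then waiting_list
        else "대기 명단\n" ++ "=========================================\n" ++ waiting_list
              ++ "=========================================")
      = (let lines := pvBlocks t (List.zip ["탑", "정글", "미드", "원딜", "서폿"] user_info)
         if lines.isEmpty then ""
         else "대기 명단\n" ++ "=========================================" ++ "\n"
              ++ PySem.Str.join "\n" lines ++ "\n" ++ "=========================================")
  have hA : (PySem.List.pyRange 0 (user_info.length : Int) 1).foldl (fun wl line_number =>
      let row := PySem.List.pyGetD user_info line_number []
      (PySem.List.pyRange 0 (row.length : Int) 1).foldl (fun wl i =>
        let wl := if i == t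
                  then wl ++ PySem.List.pyGetD ["탑", "정글", "미드", "원딜", "서폿"] line_number "" ++ "\n" else wl
        if t ≤ i
        then wl ++ PySem.List.pyGetD row i "" ++ "\n" else wl) wl) ""
      = (PySem.List.enumerate user_info 0).foldl (fun wl p =>
          (PySem.List.pyRange 0 (p.2.length : Int) 1).foldl (fun wl i =>
            let wl := if i == t
                      then wl ++ PySem.List.pyGetD ["탑", "정글", "미드", "원딜", "서폿"] p.1 "" ++ "\n" else wl
            if t ≤ i
            then wl ++ PySem.List.pyGetD p.2 i "" ++ "\n" else wl) wl) "" := by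
    rw [PySem.List.enumerate_eq_map_pyRange (d := []), List.foldl_map]
    simp [PySem.List.len_eq]
  rw [hA, A_fold _ _ ht]
  rw [String.empty_append]
  have hflat := flat_eq ["탑", "정글", "미드", "원딜", "서폿"] user_info t ht
    (by
      intro row hr
      have hlen : (row.length : Int) ≤ t := hrows row (by simpa using hr)
      exact List.drop_eq_nil_of_le (by omega))
  rw [hflat]
  set lines := pvBlocks t (List.zip ["탑", "정글", "미드", "원딜", "서폿"] user_info) with hls
  by_cases hl : lines = []
  · rw [hl]
    simp [joinE_nil]
  · have hjoin := joinE_map_nl lines hl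
    rw [hjoin]
    have hne : ¬ ((PySem.Str.join "\n" lines ++ "\n") = "") := by
      intro hz
      have h2 := congrArg String.toList hz
      simp at h2
    rw [if_neg (by simp [hne]), if_neg (by simpa [List.isEmpty_iff] using hl)]
    have hbar : "=========================================\n"
        = "=========================================" ++ "\n" := rfl
    rw [hbar]
    simp [String.append_assoc]
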